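-- pv_equiv track=rewrite | github.com/hanjiadong0/thesis_agent | backend/app/services/task_helpers/survey_helper.py | _suggest_collection_methods
-- ===== SOURCE A (Python) =====
-- from typing import Dict, List, Any, Optional
--
-- def _suggest_collection_methods(objective: str) -> List[Dict[str, str]]:
--     """Suggest appropriate data collection methods."""
--     objective_lower = objective.lower()
--
--     methods = []
--
--     # Online surveys
--     methods.append({
--         "method": "Online Survey",
--         "description": "Web-based questionnaire using platforms like Google Forms, SurveyMonkey",
--         "pros": "Cost-effective, wide reach, easy data collection",
--         "cons": "Potential sampling bias, lower response rates"
--     })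
--
--     # Interviews
--     if any(word in objective_lower for word in ['experience', 'opinion', 'perspective', 'qualitative']):
--         methods.append({
--             "method": "Semi-structured Interviews",
--             "description": "In-depth interviews with open-ended questions",
--             "pros": "Rich qualitative data, flexibility to explore topics",
--             "cons": "Time-consuming, difficult to analyze, small sample sizes"
--         })
--
--     # Focus groups
--     if any(word in objective_lower for word in ['group', 'discussion', 'feedback']):
--         methods.append({
--             "method": "Focus Groups",
--             "description": "Facilitated group discussions",
--             "pros": "Group dynamics, multiple perspectives, cost-effective",
--             "cons": "Potential groupthink, difficult to schedule"
--         })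
--
--     # Observations
--     if any(word in objective_lower for word in ['behavior', 'usage', 'interaction']):
--         methods.append({
--             "method": "Observational Study",
--             "description": "Direct observation of behaviors or phenomena",
--             "pros": "Natural behavior, no self-report bias",
--             "cons": "Time-intensive, observer bias, limited scope"
--         })
--
--     return methods
-- ===== SOURCE B (Python) =====
-- from typing import Dict, List
--
-- _METHODS = [
--     {
--         "method": "Online Survey",
--         "description": "Web-based questionnaire using platforms like Google Forms, SurveyMonkey",
--         "pros": "Cost-effective, wide reach, easy data collection",
--         "cons": "Potential sampling bias, lower response rates"
--     },
--     {
--         "method": "Semi-structured Interviews",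
--         "description": "In-depth interviews with open-ended questions",
--         "pros": "Rich qualitative data, flexibility to explore topics",
--         "cons": "Time-consuming, difficult to analyze, small sample sizes"
--     },
--     {
--         "method": "Focus Groups",
--         "description": "Facilitated group discussions",
--         "pros": "Group dynamics, multiple perspectives, cost-effective",
--         "cons": "Potential groupthink, difficult to schedule"
--     },
--     {
--         "method": "Observational Study",
--         "description": "Direct observation of behaviors or phenomena",
--         "pros": "Natural behavior, no self-report bias",
--         "cons": "Time-intensive, observer bias, limited scope"
--     },
-- ]
--
-- # keyword -> index of the method category it triggers (category 0 needs no trigger)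
-- _KEYWORD_CATEGORY = {
--     'experience': 1, 'opinion': 1, 'perspective': 1, 'qualitative': 1,
--     'group': 2, 'discussion': 2, 'feedback': 2,
--     'behavior': 3, 'usage': 3, 'interaction': 3,
-- }
--
-- def _suggest_collection_methods(objective: str) -> List[Dict[str, str]]:
--     """Suggest appropriate data collection methods.
--
--     Multi-pattern text scan: walk the lowered objective left to right once,
--     marking the category of every keyword that starts at the current position,
--     then report the methods of the marked categories in canonical order.
--     """
--     text = objective.lower()
--     hits = {0}
--     for i in range(len(text)):
--         for kw, cat in _KEYWORD_CATEGORY.items():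
--             if cat not in hits and text.startswith(kw, i):
--                 hits.add(cat)
--     return [dict(m) for j, m in enumerate(_METHODS) if j in hits]
-- ===== Notes on version B (the rewrite author's own statement) =====
-- stated objective: alternative
-- what changed: Instead of one substring test per keyword with four inline if-append branches, B walks the lowered objective left to right once, marking in a set the category of every keyword that starts at the current position, then emits the methods of the marked categories in a separate reporting pass over the method list.
import Mathlib
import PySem

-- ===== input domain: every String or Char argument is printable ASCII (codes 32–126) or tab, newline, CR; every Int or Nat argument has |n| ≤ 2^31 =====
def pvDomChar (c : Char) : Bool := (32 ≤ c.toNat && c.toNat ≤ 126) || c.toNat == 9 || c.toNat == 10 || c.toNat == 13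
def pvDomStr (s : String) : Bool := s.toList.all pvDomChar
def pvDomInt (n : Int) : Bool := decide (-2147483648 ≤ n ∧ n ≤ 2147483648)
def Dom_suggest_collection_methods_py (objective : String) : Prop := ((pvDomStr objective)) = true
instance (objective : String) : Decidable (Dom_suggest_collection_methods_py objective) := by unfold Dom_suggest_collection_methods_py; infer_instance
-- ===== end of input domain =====

-- B replaces A's four per-keyword substring-test branches with one left-to-right positional
-- scan of the lowered text that marks matched categories in a set, then a reporting pass
-- over the method list (alternative algorithm; same cost).

-- ===== PORT A =====
def pvOnlineSurvey : List (String × String) :=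
  [("method", "Online Survey"),
   ("description", "Web-based questionnaire using platforms like Google Forms, SurveyMonkey"),
   ("pros", "Cost-effective, wide reach, easy data collection"),
   ("cons", "Potential sampling bias, lower response rates")]

def pvInterviews : List (String × String) :=
  [("method", "Semi-structured Interviews"),
   ("description", "In-depth interviews with open-ended questions"),
   ("pros", "Rich qualitative data, flexibility to explore topics"),
   ("cons", "Time-consuming, difficult to analyze, small sample sizes")]

def pvFocusGroups : List (String × String) :=
  [("method", "Focus Groups"),
   ("description", "Facilitated group discussions"),
   ("pros", "Group dynamics, multiple perspectives, cost-effective"),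
   ("cons", "Potential groupthink, difficult to schedule")]

def pvObservational : List (String × String) :=
  [("method", "Observational Study"),
   ("description", "Direct observation of behaviors or phenomena"),
   ("pros", "Natural behavior, no self-report bias"),
   ("cons", "Time-intensive, observer bias, limited scope")]

def suggest_collection_methods_py (objective : String) : List (List (String × String)) :=
  let objective_lower := PySem.Str.lower objective
  let methods : List (List (String × String)) := []
  let methods := methods ++ [pvOnlineSurvey]
  let methods :=
    if (["experience", "opinion", "perspective", "qualitative"].any
        (fun word => PySem.Str.isIn word objective_lower)) then
      methods ++ [pvInterviews]
    else methods
  let methods :=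
    if (["group", "discussion", "feedback"].any
        (fun word => PySem.Str.isIn word objective_lower)) then
      methods ++ [pvFocusGroups]
    else methods
  let methods :=
    if (["behavior", "usage", "interaction"].any
        (fun word => PySem.Str.isIn word objective_lower)) then
      methods ++ [pvObservational]
    else methods
  methods

-- ===== PORT B =====
def pvMethods : List (List (String × String)) :=
  [pvOnlineSurvey, pvInterviews, pvFocusGroups, pvObservational]

-- keyword -> category index (insertion order of Source B's dict)
def pvKeywordCategory : List (String × Int) :=
  [("experience", 1), ("opinion", 1), ("perspective", 1), ("qualitative", 1),
   ("group", 2), ("discussion", 2), ("feedback", 2),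
   ("behavior", 3), ("usage", 3), ("interaction", 3)]

-- text.startswith(kw, i) with 0 ≤ i ≤ len(text): exact as prefix-of-drop on the char list
def suggest_collection_methods_py_alt (objective : String) : List (List (String × String)) :=
  let text := objective.toList.map PySem.Chars.lowerChar   -- objective.lower(), on the char list
  let hits : PySem.Set Int := PySem.Set.ofList [0]
  let hits := (List.range text.length).foldl
    (fun h i =>
      pvKeywordCategory.foldl
        (fun h kc =>
          if ¬ h.contains kc.2 ∧ PySem.Chars.startswith (text.drop i) kc.1.toList then
            h.add kc.2
          else h)
        h)
    hits
  ((PySem.List.enumerate pvMethods).filter (fun jm => hits.contains jm.1)).map (fun jm => jm.2)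

-- ===== PRECONDITION & SPEC =====
def Spec_suggest_collection_methods_py (objective : String) (out : List (List (String × String))) : Prop := out = suggest_collection_methods_py_alt objective
instance (objective : String) (out : List (List (String × String))) : Decidable (Spec_suggest_collection_methods_py objective out) := by unfold Spec_suggest_collection_methods_py; infer_instance

-- ===== CLAIM (what is proved, stated in full; the proofs are below) =====
def Claim_equal_suggest_collection_methods_py : Prop := ∀ (objective : String), Dom_suggest_collection_methods_py objective → Spec_suggest_collection_methods_py objective (suggest_collection_methods_py objective)

-- ===== LEMMAS AND PROOFS =====

-- one step of the scan: the not-yet-marked guard does not change the resulting set's members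
lemma step_mem (h : PySem.Set Int) (t : List Char) (i : Nat) (kc : String × Int) (x : Int) :
    (x ∈ (if ¬ h.contains kc.2 ∧ PySem.Chars.startswith (t.drop i) kc.1.toList then h.add kc.2 else h)) ↔
      x ∈ h ∨ (x = kc.2 ∧ PySem.Chars.startswith (t.drop i) kc.1.toList = true) := by
  by_cases hc : PySem.Chars.startswith (t.drop i) kc.1.toList = true
  · by_cases hm : h.contains kc.2 = true
    · rw [if_neg (fun hcond => hcond.1 hm)]
      have := (PySem.Set.contains_iff h kc.2).mp hm
      constructor
      · exact fun hh => Or.inl hh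
      · rintro (hh | ⟨rfl, _⟩) <;> [exact hh; exact this]
    · rw [if_pos ⟨hm, hc⟩, PySem.Set.mem_add]
      constructor
      · rintro (hh | rfl) <;> [exact Or.inl hh; exact Or.inr ⟨rfl, hc⟩]
      · rintro (hh | ⟨rfl, _⟩) <;> [exact Or.inl hh; exact Or.inr rfl]
  · rw [if_neg (fun hcond => hc hcond.2)]
    constructor
    · exact fun hh => Or.inl hh
    · rintro (hh | ⟨rfl, hs⟩) <;> [exact hh; exact absurd hs hc]

-- membership in the inner (per-position) fold
lemma mem_inner_fold (kcs : List (String × Int)) (h : PySem.Set Int) (t : List Char) (i : Nat) (x : Int) :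
    x ∈ kcs.foldl
        (fun h kc =>
          if ¬ h.contains kc.2 ∧ PySem.Chars.startswith (t.drop i) kc.1.toList then h.add kc.2 else h)
        h ↔
      x ∈ h ∨ ∃ kc ∈ kcs, x = kc.2 ∧ PySem.Chars.startswith (t.drop i) kc.1.toList = true := by
  induction kcs generalizing h with
  | nil => simp
  | cons kc rest ih =>
    rw [List.foldl_cons, ih, step_mem, List.exists_mem_cons_iff]
    tauto

-- membership in the outer (over positions) fold
lemma mem_outer_fold (n : Nat) (h : PySem.Set Int) (t : List Char) (x : Int) :
    x ∈ (List.range n).foldl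
        (fun h i =>
          pvKeywordCategory.foldl
            (fun h kc =>
              if ¬ h.contains kc.2 ∧ PySem.Chars.startswith (t.drop i) kc.1.toList then h.add kc.2 else h)
            h)
        h ↔
      x ∈ h ∨ ∃ i < n, ∃ kc ∈ pvKeywordCategory, x = kc.2 ∧ PySem.Chars.startswith (t.drop i) kc.1.toList = true := by
  induction n generalizing h with
  | zero => simp
  | succ n ih =>
    rw [List.range_succ, List.foldl_append, List.foldl_cons, List.foldl_nil, mem_inner_fold, ih]
    constructor
    · rintro (⟨hh | ⟨i, hi, hrest⟩⟩ | ⟨kc, hkc, hx, hs⟩)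
      · exact Or.inl hh
      · exact Or.inr ⟨i, Nat.lt_succ_of_lt hi, hrest⟩
      · exact Or.inr ⟨n, Nat.lt_succ_self n, kc, hkc, hx, hs⟩
    · rintro (hh | ⟨i, hi, hrest⟩)
      · exact Or.inl (Or.inl hh)
      · rcases Nat.lt_succ_iff_lt_or_eq.mp hi with hi' | rfl
        · exact Or.inl (Or.inr ⟨i, hi', hrest⟩)
        · exact Or.inr hrest

-- "some position in range matches kw" = "kw in text" (for nonempty kw)
lemma exists_drop_iff_isIn (t : List Char) (kw : List Char) (hkw : kw ≠ []) :
    (∃ i < t.length, PySem.Chars.startswith (t.drop i) kw = true) ↔ PySem.Chars.isIn kw t = true := by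
  rw [← PySem.Chars.exists_prefix_drop_iff_isIn]
  constructor
  · rintro ⟨i, _, hs⟩
    exact ⟨i, (PySem.Chars.startswith_iff _ _).mp hs⟩
  · rintro ⟨j, hp⟩
    by_cases hj : j < t.length
    · exact ⟨j, hj, (PySem.Chars.startswith_iff _ _).mpr hp⟩
    · exfalso
      rw [List.drop_eq_nil_of_le (le_of_not_gt hj)] at hp
      exact hkw (List.prefix_nil.mp hp)

lemma lower_toList (s : String) : (PySem.Str.lower s).toList = s.toList.map PySem.Chars.lowerChar := by
  simp [PySem.Str.toList_lower, PySem.Chars.lower]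

-- ===== VERDICT (by name: the statement is the Claim_ definition above) =====
set_option maxHeartbeats 1000000 in
theorem suggest_collection_methods_py_spec : Claim_equal_suggest_collection_methods_py := by
  intro objective _
  unfold Spec_suggest_collection_methods_py suggest_collection_methods_py suggest_collection_methods_py_alt
  dsimp only
  set t : List Char := objective.toList.map PySem.Chars.lowerChar with ht
  set hits : PySem.Set Int :=
    (List.range t.length).foldl
      (fun h i =>
        pvKeywordCategory.foldl
          (fun h kc =>
            if ¬ h.contains kc.2 ∧ PySem.Chars.startswith (t.drop i) kc.1.toList then h.add kc.2 else h)
          h)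
      (PySem.Set.ofList [0]) with hhits
  have hmem : ∀ x : Int, x ∈ hits ↔
      (x = 0 ∨ ∃ kc ∈ pvKeywordCategory, x = kc.2 ∧ PySem.Chars.isIn kc.1.toList t = true) := by
    intro x
    rw [hhits, mem_outer_fold]
    constructor
    · rintro (hh | ⟨i, hi, kc, hkc, hx, hs⟩)
      · left; simpa [PySem.Set.ofList] using hh
      · right
        have hne : kc.1.toList ≠ [] := by fin_cases hkc <;> simp
        exact ⟨kc, hkc, hx, (exists_drop_iff_isIn t kc.1.toList hne).mp ⟨i, hi, hs⟩⟩
    · rintro (rfl | ⟨kc, hkc, hx, hs⟩)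
      · left; simp [PySem.Set.ofList]
      · right
        have hne : kc.1.toList ≠ [] := by fin_cases hkc <;> simp
        rcases (exists_drop_iff_isIn t kc.1.toList hne).mpr hs with ⟨i, hi, hp⟩
        exact ⟨i, hi, kc, hkc, hx, hp⟩
  have hlow : (PySem.Str.lower objective).toList = t := by rw [lower_toList]
  have h0 : hits.contains 0 = true := by
    rw [PySem.Set.contains_iff, hmem]; exact Or.inl rfl
  have h1 : hits.contains 1 =
      (["experience", "opinion", "perspective", "qualitative"].any
        (fun word => PySem.Str.isIn word (PySem.Str.lower objective))) := by
    rw [Bool.eq_iff_iff, PySem.Set.contains_iff, hmem]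
    simp [pvKeywordCategory, hlow]
  have h2 : hits.contains 2 =
      (["group", "discussion", "feedback"].any
        (fun word => PySem.Str.isIn word (PySem.Str.lower objective))) := by
    rw [Bool.eq_iff_iff, PySem.Set.contains_iff, hmem]
    simp [pvKeywordCategory, hlow]
  have h3 : hits.contains 3 =
      (["behavior", "usage", "interaction"].any
        (fun word => PySem.Str.isIn word (PySem.Str.lower objective))) := by
    rw [Bool.eq_iff_iff, PySem.Set.contains_iff, hmem]
    simp [pvKeywordCategory, hlow]
  rw [← h1, ← h2, ← h3]
  have h0' : (0 : Int) ∈ hits := (PySem.Set.contains_iff _ _).mp h0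
  by_cases b1 : (1 : Int) ∈ hits <;>
  by_cases b2 : (2 : Int) ∈ hits <;>
  by_cases b3 : (3 : Int) ∈ hits <;>
  simp [pvMethods, PySem.List.enumerate_cons, PySem.List.enumerate_nil,
    h0', b1, b2, b3]
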